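-- pv_equiv track=rewrite | github.com/andypymont/adventofcode | 2021/day18.py | literals
-- ===== SOURCE A (Python) =====
-- import string
-- from typing import Iterable, Iterator, Tuple
--
-- def literals(text: str) -> Iterator[Tuple[int, int]]:
--     start = -1
--     for pos, char in enumerate(text):
--         if char in string.digits and start == -1:
--             start = pos
--         if char not in string.digits:
--             if start != -1:
--                 yield start, pos
--             start = -1
-- ===== SOURCE B (Python) =====
-- def literals(text):
--     digits = frozenset('0123456789')
--     i, n = 0, len(text)
--     while i < n:
--         if text[i] in digits:
--             j = i + 1
--             while j < n and text[j] in digits: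
--                 j += 1
--             yield i, j
--             i = j
--         else:
--             i += 1
-- ===== Notes on version B (the rewrite author's own statement) =====
-- stated objective: alternative
-- what changed: Replaces A's per-character state machine (start sentinel, yield on the non-digit that closes a run) by a run-jumping scan: find the start of each digit run, advance an inner index to its end, and yield the whole run, including a run that reaches the end of the string.
-- intended difference: On texts whose last character is a digit, A silently drops the trailing digit run (it only yields when a following non-digit appears), returning e.g. [] on 'a1', while B yields that run too ([(1, 2)]), which is the intended set of digit-literal spans. — e.g. on literals("a1"): A returns [], B returns [(1, 2)]
import Mathlib
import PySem

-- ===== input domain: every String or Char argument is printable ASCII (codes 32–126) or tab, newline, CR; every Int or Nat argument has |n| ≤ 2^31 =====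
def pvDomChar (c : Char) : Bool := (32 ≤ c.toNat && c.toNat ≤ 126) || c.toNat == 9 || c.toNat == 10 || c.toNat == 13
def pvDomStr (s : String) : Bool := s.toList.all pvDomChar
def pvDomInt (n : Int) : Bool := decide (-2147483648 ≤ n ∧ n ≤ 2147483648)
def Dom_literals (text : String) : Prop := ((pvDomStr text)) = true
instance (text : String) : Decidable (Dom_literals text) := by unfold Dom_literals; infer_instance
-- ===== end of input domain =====

-- B yields the trailing digit run that A drops; equivalence is proved outside that corner (D_ below).

-- `char in string.digits` for an ASCII char
def pyDigit (c : Char) : Bool := '0' ≤ c && c ≤ '9'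

-- ===== PORT A =====
-- A's loop: state (start, acc); set start at a fresh digit, emit (start, pos) at a closing non-digit.
def literalsAux : List Char → Int → Int → List (Int × Int) → List (Int × Int)
  | [], _, _, acc => acc
  | c :: rest, pos, start, acc =>
    let start' := if pyDigit c && start == -1 then pos else start
    if !pyDigit c then
      literalsAux rest (pos + 1) (-1) (if start' != -1 then acc ++ [(start', pos)] else acc)
    else
      literalsAux rest (pos + 1) start' acc

def literals (text : String) : List (Int × Int) := literalsAux text.toList 0 (-1) []

-- ===== PORT B =====
-- B's outer loop: at a digit, the inner loop (takeWhile/dropWhile) jumps to the end of the run and yields it.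
def literalsAltAux : List Char → Int → List (Int × Int)
  | [], _ => []
  | c :: rest, i =>
    if pyDigit c then
      let run := rest.takeWhile pyDigit
      ((i : Int), i + 1 + run.length) :: literalsAltAux (rest.dropWhile pyDigit) (i + 1 + run.length)
    else
      literalsAltAux rest (i + 1)
termination_by l => l.length
decreasing_by
  · exact Nat.lt_succ_of_le (List.length_dropWhile_le _ _)
  · simp

def literals_alt (text : String) : List (Int × Int) := literalsAltAux text.toList 0

-- ===== PRECONDITION & SPEC =====
-- On texts ending in a digit, A drops the trailing digit run (returns e.g. [] on "a1");
-- B yields it too ([(1, 2)]), the intended set of digit-literal spans.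
def D_literals (text : String) : Prop := text ≠ "" ∧ pyDigit (text.toList.getLastD ' ') = true
instance (text : String) : Decidable (D_literals text) := by unfold D_literals; infer_instance

def Spec_literals (text : String) (out : List (Int × Int)) : Prop := ¬ D_literals text → out = literals_alt text
instance (text : String) (out : List (Int × Int)) : Decidable (Spec_literals text out) := by unfold Spec_literals; infer_instance

def pvDiffWitness_literals : String := "a1"
def pvDiffWitnessOut_literals : (List (Int × Int)) × (List (Int × Int)) := ([], [(1, 2)])

-- ===== CLAIM (what is proved, stated in full; the proofs are below) =====
def Claim_unchanged_literals : Prop := ∀ (text : String), Dom_literals text → Spec_literals text (literals text)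
def Claim_changed_literals : Prop := Dom_literals (pvDiffWitness_literals) ∧ D_literals (pvDiffWitness_literals) ∧ literals (pvDiffWitness_literals) = pvDiffWitnessOut_literals.1 ∧ literals_alt (pvDiffWitness_literals) = pvDiffWitnessOut_literals.2 ∧ pvDiffWitnessOut_literals.1 ≠ pvDiffWitnessOut_literals.2

-- ===== LEMMAS AND PROOFS =====

-- one step of A's loop, in each of its four situations
theorem step_digit_open (c : Char) (t : List Char) (i s : Int) (acc : List (Int × Int))
    (hc : pyDigit c = true) (hs : s ≠ -1) :
    literalsAux (c :: t) i s acc = literalsAux t (i + 1) s acc := by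
  simp [literalsAux, hc, hs]

theorem step_digit_fresh (c : Char) (t : List Char) (i : Int) (acc : List (Int × Int))
    (hc : pyDigit c = true) :
    literalsAux (c :: t) i (-1) acc = literalsAux t (i + 1) i acc := by
  simp [literalsAux, hc]

theorem step_nondigit_open (c : Char) (t : List Char) (i s : Int) (acc : List (Int × Int))
    (hc : pyDigit c = false) (hs : s ≠ -1) :
    literalsAux (c :: t) i s acc = literalsAux t (i + 1) (-1) (acc ++ [(s, i)]) := by
  simp [literalsAux, hc, hs]

theorem step_nondigit_closed (c : Char) (t : List Char) (i : Int) (acc : List (Int × Int))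
    (hc : pyDigit c = false) :
    literalsAux (c :: t) i (-1) acc = literalsAux t (i + 1) (-1) acc := by
  simp [literalsAux, hc]

-- "the last character (if any) is not a digit"
def okTail (l : List Char) : Bool := !pyDigit (l.getLastD ' ')

theorem getLastD_irrel (l : List Char) (h : l ≠ []) (a b : Char) :
    l.getLastD a = l.getLastD b := by
  obtain ⟨x, hx⟩ := Option.isSome_iff_exists.mp (List.getLast?_isSome.mpr h)
  simp [List.getLastD_eq_getLast?, hx]

theorem okTail_of_cons {c : Char} {l : List Char} (h : okTail (c :: l) = true) (hne : l ≠ []) :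
    okTail l = true := by
  unfold okTail at h ⊢
  rw [List.getLastD_cons, getLastD_irrel l hne c ' '] at h
  exact h

theorem getLastD_dropWhile (p : Char → Bool) (l : List Char) (d : Char)
    (h : l.dropWhile p ≠ []) : (l.dropWhile p).getLastD d = l.getLastD d := by
  induction l with
  | nil => simp at h
  | cons c t ih =>
    by_cases hc : p c = true
    · rw [List.dropWhile_cons_of_pos hc] at h ⊢
      rw [ih h, List.getLastD_cons]
      exact getLastD_irrel t (by intro ht; rw [ht] at h; simp [List.dropWhile] at h) d c
    · rw [List.dropWhile_cons_of_neg hc]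

theorem okTail_dropWhile {p : Char → Bool} {l : List Char} (h : okTail l = true) :
    okTail (l.dropWhile p) = true := by
  by_cases hne : l.dropWhile p = []
  · simp [hne, okTail, pyDigit]
  · unfold okTail at h ⊢
    rw [getLastD_dropWhile p l ' ' hne]
    exact h

-- Skipping digits while a run is open (start ≠ -1) only advances the position.
theorem literalsAux_run (l : List Char) (i s : Int) (acc : List (Int × Int)) (hs : s ≠ -1) :
    literalsAux l i s acc =
      literalsAux (l.dropWhile pyDigit) (i + (l.takeWhile pyDigit).length) s acc := by
  induction l generalizing i with
  | nil => simp
  | cons c t ih =>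
    by_cases hc : pyDigit c = true
    · rw [List.dropWhile_cons_of_pos hc, List.takeWhile_cons_of_pos hc,
        step_digit_open c t i s acc hc hs, ih (i + 1)]
      congr 1
      simp only [List.length_cons]
      push_cast
      ring
    · rw [List.dropWhile_cons_of_neg hc, List.takeWhile_cons_of_neg hc]
      simp

-- Main loop invariant: with no run open, A emits exactly the spans B yields, appended to acc.
theorem main_lemma (l : List Char) (i : Int) (acc : List (Int × Int))
    (hi : 0 ≤ i) (hok : okTail l = true) :
    literalsAux l i (-1) acc = acc ++ literalsAltAux l i := by
  fun_induction literalsAltAux l i generalizing acc with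
  | case1 i => simp [literalsAux]
  | case2 c rest i hc run ihf =>
    have hrun : run = rest.takeWhile pyDigit := rfl
    simp only [hrun]
    have hine : i ≠ -1 := by omega
    rw [step_digit_fresh c rest i acc hc, literalsAux_run rest (i + 1) i acc hine]
    cases hdw : rest.dropWhile pyDigit with
    | nil =>
      -- then every char of c :: rest is a digit, so the last one is: contradicts okTail
      exfalso
      have hall : ∀ x ∈ c :: rest, pyDigit x = true := by
        intro x hx
        rcases List.mem_cons.mp hx with h | h
        · exact h ▸ hc
        · exact (List.dropWhile_eq_nil_iff).mp hdw x h
      have hlast := hall _ (List.getLastD_mem_cons (α := Char))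
      unfold okTail at hok
      rw [List.getLastD_cons] at hok
      rw [List.getLastD_eq_getLast?] at hlast
      simp [hlast] at hok
    | cons d t =>
      have hd : pyDigit d = false := by
        have := List.head?_dropWhile_not pyDigit rest
        rw [hdw] at this
        simpa using this
      have hok' : okTail (d :: t) = true := by
        have hokr : okTail rest = true := by
          cases rest with
          | nil => simp [List.dropWhile] at hdw
          | cons r rt => exact okTail_of_cons hok (by simp)
        have := okTail_dropWhile (p := pyDigit) hokr
        rwa [hdw] at this
      rw [step_nondigit_open d t _ i acc hd hine]
      have hIH := ihf (acc ++ [(i, i + 1 + (rest.takeWhile pyDigit).length)]) (by omega)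
        (by rw [hdw]; exact hok')
      simp only [hrun] at hIH
      rw [hdw] at hIH
      have hback : literalsAux (d :: t) (i + 1 + ((rest.takeWhile pyDigit).length : Int)) (-1)
            (acc ++ [(i, i + 1 + (rest.takeWhile pyDigit).length)]) =
          literalsAux t (i + 1 + ((rest.takeWhile pyDigit).length : Int) + 1) (-1)
            (acc ++ [(i, i + 1 + (rest.takeWhile pyDigit).length)]) :=
        step_nondigit_closed d t _ _ hd
      rw [← hback, hIH]
      simp
  | case3 c rest i hc ihf =>
    rw [step_nondigit_closed c rest i acc (by simpa using hc),
      ihf acc (by omega) (by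
        cases rest with
        | nil => simp [okTail, pyDigit]
        | cons r rt => exact okTail_of_cons hok (by simp))]

-- ===== VERDICT (by name: the statement is the Claim_ definition above) =====
theorem literals_spec : Claim_unchanged_literals := by
  intro text _ hD
  unfold D_literals at hD
  unfold literals literals_alt
  apply main_lemma _ _ _ le_rfl
  by_cases hne : text = ""
  · subst hne; simp [okTail, pyDigit]
  · have hlast : ¬ pyDigit (text.toList.getLastD ' ') = true := fun h => hD ⟨hne, h⟩
    have hfalse : pyDigit (text.toList.getLastD ' ') = false := by
      revert hlast; cases pyDigit (text.toList.getLastD ' ') <;> simp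
    rw [List.getLastD_eq_getLast?] at hfalse
    simp [okTail, hfalse]

theorem literals_changed : Claim_changed_literals := by
  unfold Claim_changed_literals pvDiffWitness_literals pvDiffWitnessOut_literals
  have ha : pyDigit 'a' = false := by decide
  have h1 : pyDigit '1' = true := by decide
  refine ⟨by decide, by decide, by decide, ?_, by decide⟩
  show literalsAltAux ['a', '1'] 0 = [(1, 2)]
  rw [literalsAltAux]
  simp only [ha, Bool.false_eq_true, if_false]
  rw [literalsAltAux]
  simp [h1, literalsAltAux]
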